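-- pv_equiv track=rewrite | github.com/DiagAutoClinic/DiagAutoClinicOS | core/dacos_vin_truth_engin.py | _wmi_to_market
-- ===== SOURCE A (Python) =====
-- def _wmi_to_market(wmi: str) -> str:
--     """Convert WMI to market with cryptographic verification"""
--     wmi_prefix = wmi[:2]
--
--     market_map = {
--         "AA": "ZA",  # South Africa
--         "AB": "ZA",
--         "AC": "ZA",
--         "AD": "ZA",
--         "AE": "ZA",
--         "AF": "ZA",
--         "JA": "JP",  # Japan
--         "JF": "JP",
--         "JH": "JP",
--         "JK": "JP",
--         "JL": "JP",
--         "JM": "JP",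
--         "1G": "US",  # USA
--         "1H": "US",
--         "1J": "US",
--         "1N": "US",
--         "1V": "US",
--         "WBA": "DE",  # Germany
--         "WBS": "DE",
--         "WBX": "DE",
--         "WBY": "DE",
--         # Add more mappings...
--     }
--
--     # Check full WMI first, then prefixes
--     market = market_map.get(wmi)
--     if not market:
--         for prefix, mkt in market_map.items():
--             if wmi.startswith(prefix):
--                 market = mkt
--                 break
--
--     return market or "UNKNOWN"
-- ===== SOURCE B (Python) =====
-- def _wmi_to_market(wmi: str) -> str:
--     """Convert WMI to market via two fixed-length prefix lookups"""
--     market_map = {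
--         "AA": "ZA",  # South Africa
--         "AB": "ZA",
--         "AC": "ZA",
--         "AD": "ZA",
--         "AE": "ZA",
--         "AF": "ZA",
--         "JA": "JP",  # Japan
--         "JF": "JP",
--         "JH": "JP",
--         "JK": "JP",
--         "JL": "JP",
--         "JM": "JP",
--         "1G": "US",  # USA
--         "1H": "US",
--         "1J": "US",
--         "1N": "US",
--         "1V": "US",
--         "WBA": "DE",  # Germany
--         "WBS": "DE",
--         "WBX": "DE",
--         "WBY": "DE",
--     }
--     # every key has length 2 or 3, and no 3-char key's first two chars form a key,
--     # so checking the 3-char prefix first, then the 2-char one, matches A exactly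
--     return market_map.get(wmi[:3]) or market_map.get(wmi[:2]) or "UNKNOWN"
-- ===== Notes on version B (the rewrite author's own statement) =====
-- stated objective: simpler
-- what changed: A does an exact dict lookup and then linearly scans all dict items testing startswith; B drops the scan entirely and does two direct dictionary lookups on the fixed-length prefixes wmi[:3] and wmi[:2] (every key has length 2 or 3 and no 3-char key's 2-char prefix is a key, so the first matching lookup is exactly A's first matching item).
import Mathlib
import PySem

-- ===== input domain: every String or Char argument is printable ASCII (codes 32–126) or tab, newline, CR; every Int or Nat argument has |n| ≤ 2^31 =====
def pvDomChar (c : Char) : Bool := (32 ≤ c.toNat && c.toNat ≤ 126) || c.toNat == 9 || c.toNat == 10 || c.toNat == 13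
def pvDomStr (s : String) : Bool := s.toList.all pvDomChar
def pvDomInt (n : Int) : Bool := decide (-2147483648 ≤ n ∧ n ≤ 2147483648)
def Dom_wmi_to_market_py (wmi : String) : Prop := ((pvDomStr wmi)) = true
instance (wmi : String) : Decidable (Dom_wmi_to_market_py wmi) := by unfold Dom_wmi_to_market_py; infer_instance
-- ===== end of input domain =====

-- B replaces A's exact-match lookup plus linear scan over the dict items by two direct
-- fixed-length prefix lookups (wmi[:3], then wmi[:2]); objective: simpler.

-- ===== PORT A =====
-- the market dict literal (pure data, shared by both ports)
def pvMarketItems : List (String × String) :=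
  [("AA","ZA"),("AB","ZA"),("AC","ZA"),("AD","ZA"),("AE","ZA"),("AF","ZA"),
   ("JA","JP"),("JF","JP"),("JH","JP"),("JK","JP"),("JL","JP"),("JM","JP"),
   ("1G","US"),("1H","US"),("1J","US"),("1N","US"),("1V","US"),
   ("WBA","DE"),("WBS","DE"),("WBX","DE"),("WBY","DE")]

-- Python truthiness of an Optional[str] value
def pvStrTruthy : Option String → Bool
  | some s => s ≠ ""
  | none => false

def wmi_to_market_py (wmi : String) : String :=
  let _wmi_prefix := PySem.Str.slice wmi none (some 2)   -- wmi[:2] (bound and unused, as in A)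
  let market_map := PySem.Dict.ofList pvMarketItems
  let market := market_map.get? wmi                      -- market_map.get(wmi)
  let market :=                                          -- if not market: for prefix, mkt in …: break
    if pvStrTruthy market then market
    else (market_map.items.find? (fun p => PySem.Str.startswith wmi p.1)).map (·.2)
  if pvStrTruthy market then market.getD "" else "UNKNOWN"   -- return market or "UNKNOWN"

-- ===== PORT B =====
-- Python's `x or y` where x : Optional[str]
def pvOrStr (o : Option String) (dflt : String) : String :=
  match o with
  | some s => if s = "" then dflt else s
  | none => dflt

def wmi_to_market_py_alt (wmi : String) : String :=
  let market_map := PySem.Dict.ofList pvMarketItems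
  pvOrStr (market_map.get? (PySem.Str.slice wmi none (some 3)))      -- market_map.get(wmi[:3])
    (pvOrStr (market_map.get? (PySem.Str.slice wmi none (some 2))) "UNKNOWN")   -- or …get(wmi[:2]) or "UNKNOWN"

-- ===== PRECONDITION & SPEC =====
def Spec_wmi_to_market_py (wmi : String) (out : String) : Prop := out = wmi_to_market_py_alt wmi
instance (wmi : String) (out : String) : Decidable (Spec_wmi_to_market_py wmi out) := by unfold Spec_wmi_to_market_py; infer_instance

-- ===== CLAIM (what is proved, stated in full; the proofs are below) =====
def Claim_equal_wmi_to_market_py : Prop := ∀ (wmi : String), Dom_wmi_to_market_py wmi → Spec_wmi_to_market_py wmi (wmi_to_market_py wmi)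

-- ===== LEMMAS AND PROOFS =====
theorem pvItemsL : (PySem.Dict.ofList pvMarketItems).items = pvMarketItems := by decide

theorem pvBeqLit (s : String) (l : List Char) : (s == String.ofList l) = decide (s.toList = l) := by
  rcases eq_or_ne s.toList l with h | h
  · simp [← h, String.ofList_toList]
  · simp [h]
    intro hc
    exact h (by rw [hc]; simp)

theorem pvIsPrefixOf_eq (u w : List Char) : u.isPrefixOf w = decide (u = w.take u.length) := by
  by_cases h : u <+: w
  · have h1 : u.isPrefixOf w = true := List.isPrefixOf_iff_prefix.mpr h
    have h2 : u = w.take u.length := List.prefix_iff_eq_take.mp h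
    rw [h1, ← h2]
    simp
  · have h2 : ¬ u = w.take u.length := fun hc => h (List.prefix_iff_eq_take.mpr hc)
    have h1 : u.isPrefixOf w = false := by
      rw [Bool.eq_false_iff, ne_eq, List.isPrefixOf_iff_prefix]
      exact h
    rw [h1]
    simp [h2]

theorem pvFindCongr {α : Type} (p q : α → Bool) (l : List α) (h : ∀ x ∈ l, p x = q x) :
    l.find? p = l.find? q := by
  induction l with
  | nil => rfl
  | cons x xs ih =>
    rw [List.find?_cons, List.find?_cons, h x (List.mem_cons_self),
      ih (fun y hy => h y (List.mem_cons_of_mem _ hy))]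

theorem pvFindPrefix (w : List Char) (l : List (String × String))
    (hpf : ∀ p ∈ l, ∀ q ∈ l, p.1.toList <+: q.1.toList → p.1 = q.1)
    (pv : String × String)
    (h : l.find? (fun p => p.1 == String.ofList w) = some pv) :
    l.find? (fun p => p.1.toList.isPrefixOf w) = some pv := by
  induction l with
  | nil => simp at h
  | cons x xs ih =>
    have hpv1 : pv.1.toList = w := by
      have := List.find?_some h
      have h2 : pv.1 = String.ofList w := by simpa using this
      rw [h2]; simp
    have hmem : pv ∈ x :: xs := List.mem_of_find?_eq_some h
    rw [List.find?_cons] at h ⊢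
    by_cases hx : (x.1 == String.ofList w) = true
    · have hxe : x.1 = String.ofList w := by simpa using hx
      have : x.1.toList.isPrefixOf w = true := by
        rw [List.isPrefixOf_iff_prefix, hxe]; simp
      simp only [hx, if_pos rfl] at h
      simp [this, h]
    · have hxf : (x.1 == String.ofList w) = false := by simpa using hx
      rw [hxf] at h
      simp only [if_neg Bool.false_ne_true] at h
      have hmem' : pv ∈ xs := List.mem_of_find?_eq_some h
      have hxpre : x.1.toList.isPrefixOf w = false := by
        by_contra hc
        have hb : x.1.toList.isPrefixOf w = true := by
          cases hb2 : x.1.toList.isPrefixOf w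
          · exact absurd hb2 hc
          · rfl
        have hpre : x.1.toList <+: w := List.isPrefixOf_iff_prefix.mp hb
        have : x.1 = pv.1 := hpf x (List.mem_cons_self) pv hmem (by rw [hpv1]; exact hpre)
        rw [this] at hxf
        simp [hpv1] at hxf
        exact hxf (by rw [← hpv1]; simp)
      rw [hxpre]
      simp only [if_neg Bool.false_ne_true]
      exact ih (fun p hp q hq => hpf p (List.mem_cons_of_mem _ hp) q (List.mem_cons_of_mem _ hq)) h

theorem pvOrIf (m : Option String) :
    (if pvStrTruthy m then m.getD "" else "UNKNOWN") = pvOrStr m "UNKNOWN" := by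
  cases m with
  | none => rfl
  | some s => by_cases h : s = "" <;> simp [pvStrTruthy, pvOrStr, h]

theorem pvAChar (w : List Char) :
    wmi_to_market_py (String.ofList w) =
      pvOrStr ((pvMarketItems.find? (fun p => p.1.toList.isPrefixOf w)).map (·.2)) "UNKNOWN" := by
  have hpf : ∀ p ∈ pvMarketItems, ∀ q ∈ pvMarketItems, p.1.toList <+: q.1.toList → p.1 = q.1 := by
    decide
  simp only [wmi_to_market_py, PySem.Dict.get?, pvItemsL, PySem.Str.startswith,
    PySem.Chars.startswith, String.toList_ofList]
  cases hf : pvMarketItems.find? (fun p => p.1 == String.ofList w) with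
  | none =>
    simp only [Option.map_none, pvStrTruthy, if_neg Bool.false_ne_true]
    exact pvOrIf _
  | some pv =>
    have h2 := pvFindPrefix w pvMarketItems hpf pv hf
    have hne : pv.2 ≠ "" := by
      have hmem := List.mem_of_find?_eq_some hf
      have hall : ∀ p ∈ pvMarketItems, p.2 ≠ "" := by decide
      exact hall pv hmem
    rw [h2]
    simp [pvStrTruthy, hne, pvOrStr]

theorem pvSliceTake (w : List Char) (n : Nat) :
    PySem.Str.slice (String.ofList w) none (some (n : Int)) = String.ofList (w.take n) := by
  simp [PySem.Str.slice, PySem.List.slice_to_natCast]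

theorem pvBChar (w : List Char) :
    wmi_to_market_py_alt (String.ofList w) =
      pvOrStr ((pvMarketItems.find? (fun p => p.1 == String.ofList (w.take 3))).map (·.2))
        (pvOrStr ((pvMarketItems.find? (fun p => p.1 == String.ofList (w.take 2))).map (·.2)) "UNKNOWN") := by
  have e3 : ((3:Nat) : Int) = (3 : Int) := by norm_num
  have e2 : ((2:Nat) : Int) = (2 : Int) := by norm_num
  rw [wmi_to_market_py_alt, ← e3, ← e2, pvSliceTake, pvSliceTake, PySem.Dict.get?, PySem.Dict.get?, pvItemsL]

def pvL2 : List (String × String) :=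
  [("AA","ZA"),("AB","ZA"),("AC","ZA"),("AD","ZA"),("AE","ZA"),("AF","ZA"),
   ("JA","JP"),("JF","JP"),("JH","JP"),("JK","JP"),("JL","JP"),("JM","JP"),
   ("1G","US"),("1H","US"),("1J","US"),("1N","US"),("1V","US")]
def pvL3 : List (String × String) :=
  [("WBA","DE"),("WBS","DE"),("WBX","DE"),("WBY","DE")]

theorem pvSplit : pvMarketItems = pvL2 ++ pvL3 := rfl

theorem pvMain (w : List Char) :
    pvOrStr ((pvMarketItems.find? (fun p => p.1.toList.isPrefixOf w)).map (·.2)) "UNKNOWN" =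
      pvOrStr ((pvMarketItems.find? (fun p => p.1 == String.ofList (w.take 3))).map (·.2))
        (pvOrStr ((pvMarketItems.find? (fun p => p.1 == String.ofList (w.take 2))).map (·.2)) "UNKNOWN") := by
  have hl2 : ∀ p ∈ pvL2, p.1.toList.length = 2 := by decide
  have hl3 : ∀ p ∈ pvL3, p.1.toList.length = 3 := by decide
  have fA2 : pvL2.find? (fun p => p.1.toList.isPrefixOf w)
      = pvL2.find? (fun p => decide (p.1.toList = w.take 2)) := by
    refine pvFindCongr _ _ _ (fun p hp => ?_)
    rw [pvIsPrefixOf_eq, hl2 p hp]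
  have fA3 : pvL3.find? (fun p => p.1.toList.isPrefixOf w)
      = pvL3.find? (fun p => decide (p.1.toList = w.take 3)) := by
    refine pvFindCongr _ _ _ (fun p hp => ?_)
    rw [pvIsPrefixOf_eq, hl3 p hp]
  have fB2 : ∀ (l : List (String × String)) (u : List Char),
      l.find? (fun p => p.1 == String.ofList u) = l.find? (fun p => decide (p.1.toList = u)) :=
    fun l u => pvFindCongr _ _ _ (fun p _ => pvBeqLit p.1 u)
  have f3none2 : pvL3.find? (fun p => decide (p.1.toList = w.take 2)) = none := by
    rw [List.find?_eq_none]
    intro p hp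
    simp only [decide_eq_true_eq]
    intro hc
    have := hl3 p hp
    rw [hc] at this
    have h2 : (w.take 2).length ≤ 2 := by simp [List.length_take]
    omega
  rw [pvSplit, List.find?_append, List.find?_append, List.find?_append,
    fA2, fA3, fB2, fB2, fB2, fB2, f3none2]
  by_cases hw : w.length ≤ 2
  · have ht3 : w.take 3 = w := List.take_of_length_le (by omega)
    have ht2 : w.take 2 = w := List.take_of_length_le (by omega)
    rw [ht3, ht2]
    have f3w : pvL3.find? (fun p => decide (p.1.toList = w)) = none := by
      rw [List.find?_eq_none]
      intro p hp
      simp only [decide_eq_true_eq]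
      intro hc
      have := hl3 p hp
      rw [hc] at this
      omega
    rw [f3w]
    cases h2 : pvL2.find? (fun p => decide (p.1.toList = w)) with
    | none => rfl
    | some pv =>
      simp only [Option.or_some, Option.or_none, Option.map_some, pvOrStr]
      split <;> rfl
  · have hlen3 : (w.take 3).length = 3 := by simp [List.length_take]; omega
    have hlen2 : (w.take 2).length = 2 := by simp [List.length_take]; omega
    have f2none3 : pvL2.find? (fun p => decide (p.1.toList = w.take 3)) = none := by
      rw [List.find?_eq_none]
      intro p hp
      simp only [decide_eq_true_eq]
      intro hc
      have := hl2 p hp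
      rw [hc, hlen3] at this
      omega
    rw [f2none3]
    cases hr3 : pvL3.find? (fun p => decide (p.1.toList = w.take 3)) with
    | none =>
      simp [pvOrStr]
    | some pv =>
      have hmem : pv ∈ pvL3 := List.mem_of_find?_eq_some hr3
      have hps : pv.1.toList = w.take 3 := by
        have := List.find?_some hr3
        simpa using this
      have hwb : w.take 2 = ['W','B'] := by
        have hWB : ∀ p ∈ pvL3, p.1.toList.take 2 = ['W','B'] := by decide
        have h1 : (w.take 3).take 2 = w.take 2 := by
          rw [List.take_take]
          norm_num
        rw [← h1, ← hps, hWB pv hmem]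
      have f2wb : pvL2.find? (fun p => decide (p.1.toList = w.take 2)) = none := by
        rw [List.find?_eq_none, hwb]
        intro p hp
        simp only [decide_eq_true_eq]
        have : ∀ q ∈ pvL2, q.1.toList ≠ ['W','B'] := by decide
        exact this p hp
      have hne : pv.2 ≠ "" := by
        have : ∀ p ∈ pvL3, p.2 ≠ "" := by decide
        exact this pv hmem
      rw [f2wb]
      simp [pvOrStr, hne]

-- ===== VERDICT (by name: the statement is the Claim_ definition above) =====
theorem wmi_to_market_py_spec : Claim_equal_wmi_to_market_py := by
  intro wmi _
  unfold Spec_wmi_to_market_py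
  have h : wmi = String.ofList wmi.toList := by simp
  rw [h, pvAChar, pvBChar, pvMain]
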